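-- pv_equiv track=rewrite | github.com/nikodemus-eth/ACDS | process-swarm-gen2/swarm/definer/action_extraction.py | _extract_verb_and_object
-- ===== SOURCE A (Python) =====
-- from typing import Optional
--
-- AMBIGUOUS_VERBS = frozenset({"process", "prepare", "handle", "fix", "update"})
--
-- KNOWN_VERBS = frozenset({
--     "run", "post", "send", "generate", "create", "write",
--     "delete", "email", "notify", "deliver", "collect", "build",
--     "validate", "test", "transform", "filter", "format",
--     "compile", "package", "deploy", "configure", "monitor",
-- })
--
-- def _extract_verb_and_object(clause: str) -> tuple[Optional[str], Optional[str]]: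
--     words = clause.strip().split()
--     if not words:
--         return None, None
--
--     verb = words[0].lower().rstrip(".,;:")
--     obj = " ".join(words[1:]).strip().rstrip(".,;:") if len(words) > 1 else None
--
--     if verb not in KNOWN_VERBS and verb not in AMBIGUOUS_VERBS:
--         # Try to find a known verb further in
--         for i, w in enumerate(words[1:], 1):
--             w_lower = w.lower().rstrip(".,;:")
--             if w_lower in KNOWN_VERBS or w_lower in AMBIGUOUS_VERBS:
--                 verb = w_lower
--                 obj = " ".join(words[i + 1:]).strip().rstrip(".,;:") if i + 1 < len(words) else None
--                 break
--
--     return verb if verb else None, obj if obj else None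
-- ===== SOURCE B (Python) =====
-- from typing import Optional
--
-- AMBIGUOUS_VERBS = frozenset({"process", "prepare", "handle", "fix", "update"})
--
-- KNOWN_VERBS = frozenset({
--     "run", "post", "send", "generate", "create", "write",
--     "delete", "email", "notify", "deliver", "collect", "build",
--     "validate", "test", "transform", "filter", "format",
--     "compile", "package", "deploy", "configure", "monitor",
-- })
--
-- ALL_VERBS = KNOWN_VERBS | AMBIGUOUS_VERBS
--
--
-- def _norm(w: str) -> str:
--     return w.lower().rstrip(".,;:")
--
--
-- def _find_split(words: list) -> Optional[tuple]:
--     """Recursively split the word list at the first verb: (normalized verb, remaining words)."""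
--     if not words:
--         return None
--     v = _norm(words[0])
--     return (v, words[1:]) if v in ALL_VERBS else _find_split(words[1:])
--
--
-- def _extract_verb_and_object(clause: str) -> tuple[Optional[str], Optional[str]]:
--     words = clause.strip().split()
--     if not words:
--         return None, None
--     verb, rest = _find_split(words) or (_norm(words[0]), words[1:])
--     obj = " ".join(rest).strip().rstrip(".,;:")
--     return verb or None, obj or None
-- ===== Notes on version B (the rewrite author's own statement) =====
-- stated objective: alternative
-- what changed: Replaces A's default-then-override structure (set verb/obj from word 0, then an indexed loop over the tail overwriting them on the first known verb) by a recursive Optional-returning splitter over the word list (first verb plus remaining words, against a single union set) with an or-fallback to the head word, from which verb and object are derived once.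
import Mathlib
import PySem

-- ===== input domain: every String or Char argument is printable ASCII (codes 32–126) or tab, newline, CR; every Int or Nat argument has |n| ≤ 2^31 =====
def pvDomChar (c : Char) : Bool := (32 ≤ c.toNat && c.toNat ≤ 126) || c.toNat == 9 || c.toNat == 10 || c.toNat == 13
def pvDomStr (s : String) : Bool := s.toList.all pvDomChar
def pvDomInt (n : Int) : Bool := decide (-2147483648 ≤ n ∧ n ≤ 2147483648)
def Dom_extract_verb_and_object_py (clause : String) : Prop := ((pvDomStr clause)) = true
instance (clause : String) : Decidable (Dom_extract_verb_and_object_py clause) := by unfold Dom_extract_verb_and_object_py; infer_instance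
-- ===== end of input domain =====

-- B replaces A's default-then-override loop by a recursive Optional-returning splitter over the
-- word list (first verb + remaining words) with an `or`-fallback — a different decomposition, same cost.

-- ===== PORT A =====
-- module constants shared by both Pythons (frozensets of verbs), as List Char words
def pvAmbiguousVerbs : PySem.Set (List Char) :=
  PySem.Set.ofList (["process", "prepare", "handle", "fix", "update"].map String.toList)

def pvKnownVerbs : PySem.Set (List Char) :=
  PySem.Set.ofList (["run", "post", "send", "generate", "create", "write",
    "delete", "email", "notify", "deliver", "collect", "build",
    "validate", "test", "transform", "filter", "format",
    "compile", "package", "deploy", "configure", "monitor"].map String.toList)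

-- w.rstrip(".,;:") — exact hand port: drop trailing chars from the set {'.', ',', ';', ':'}
def pvRstripPunct (cs : List Char) : List Char :=
  (cs.reverse.dropWhile (fun c => c = '.' ∨ c = ',' ∨ c = ';' ∨ c = ':')).reverse

-- w.lower().rstrip(".,;:")
def pvNorm (w : List Char) : List Char := pvRstripPunct (PySem.Chars.lower w)

-- A's test 'verb in KNOWN_VERBS or verb in AMBIGUOUS_VERBS' (two separate membership tests)
def pvIsVerb (w : List Char) : Bool := pvKnownVerbs.contains w || pvAmbiguousVerbs.contains w

-- " ".join(xs).strip().rstrip(".,;:")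
def pvObjOf (xs : List (List Char)) : List Char :=
  pvRstripPunct (PySem.Chars.strip (PySem.Chars.join [' '] xs))

-- A's for-loop over enumerate(words[1:], 1) with break
def pvLoopA (ws : List (List Char)) (i : Nat) (words : List (List Char))
    (verb : List Char) (obj : Option (List Char)) : List Char × Option (List Char) :=
  match ws with
  | [] => (verb, obj)
  | w :: rest =>
    let wLower := pvNorm w
    if pvIsVerb wLower then
      -- words[i+1:] is the slice from a nonnegative index, i.e. List.drop (i+1)
      (wLower, if i + 1 < words.length then some (pvObjOf (words.drop (i + 1))) else none)
    else
      pvLoopA rest (i + 1) words verb obj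

def extract_verb_and_object_py (clause : String) : Option String × Option String :=
  let words := PySem.Chars.split₀ (PySem.Chars.strip clause.toList)
  match words with
  | [] => (none, none)
  | w0 :: rest =>
    let verb := pvNorm w0
    let obj : Option (List Char) :=
      if words.length > 1 then some (pvObjOf rest) else none
    let vo :=
      if ¬ pvIsVerb verb then pvLoopA rest 1 words verb obj else (verb, obj)
    -- verb if verb else None, obj if obj else None
    ((if vo.1 ≠ [] then some (String.ofList vo.1) else none),
     (match vo.2 with
      | some o => if o ≠ [] then some (String.ofList o) else none
      | none => none))

-- ===== PORT B =====
-- ALL_VERBS = KNOWN_VERBS | AMBIGUOUS_VERBS (one union, one membership test)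
def pvAllVerbs : PySem.Set (List Char) := PySem.Set.union pvKnownVerbs pvAmbiguousVerbs

-- _find_split(words): recursively split at the first verb → Optional (normalized verb, remaining words)
def pvFindSplit : List (List Char) → Option (List Char × List (List Char))
  | [] => none
  | w :: rest =>
    let v := pvNorm w
    if pvAllVerbs.contains v then some (v, rest) else pvFindSplit rest

def extract_verb_and_object_py_alt (clause : String) : Option String × Option String :=
  let words := PySem.Chars.split₀ (PySem.Chars.strip clause.toList)
  match words with
  | [] => (none, none)
  | w0 :: rest =>
    -- verb, rest = _find_split(words) or (_norm(words[0]), words[1:])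
    let vr := (pvFindSplit (w0 :: rest)).getD (pvNorm w0, rest)
    let obj := pvObjOf vr.2
    ((if vr.1 ≠ [] then some (String.ofList vr.1) else none),
     (if obj ≠ [] then some (String.ofList obj) else none))

-- ===== PRECONDITION & SPEC =====
def Spec_extract_verb_and_object_py (clause : String) (out : Option String × Option String) : Prop := out = extract_verb_and_object_py_alt clause
instance (clause : String) (out : Option String × Option String) : Decidable (Spec_extract_verb_and_object_py clause out) := by unfold Spec_extract_verb_and_object_py; infer_instance

-- ===== CLAIM (what is proved, stated in full; the proofs are below) =====
def Claim_equal_extract_verb_and_object_py : Prop := ∀ (clause : String), Dom_extract_verb_and_object_py clause → Spec_extract_verb_and_object_py clause (extract_verb_and_object_py clause)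

-- ===== LEMMAS AND PROOFS =====

theorem pvObjOf_nil : pvObjOf [] = [] := rfl

-- B's single membership test in the union equals A's pair of membership tests
theorem pvAllVerbs_contains (w : List Char) :
    pvAllVerbs.contains w = pvIsVerb w := by
  simp [pvAllVerbs, pvIsVerb, PySem.Set.contains, pysem]

-- A's 'obj if obj else None' coercion collapses to B's direct emptiness test
theorem pv_coerce (o : List Char) (c : Prop) [Decidable c] (h : ¬ c → o = []) :
    (match (if c then some o else none : Option (List Char)) with
      | some o => if o ≠ [] then some (String.ofList o) else none
      | none => none)
    = (if o ≠ [] then some (String.ofList o) else none) := by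
  by_cases hc : c
  · simp [hc]
  · simp [hc, h hc]

-- A's loop equals B's recursive splitter on the remaining words
theorem pvLoopA_eq_findSplit (ws : List (List Char)) (i : Nat) (words : List (List Char))
    (verb : List Char) (obj : Option (List Char)) (hdrop : words.drop i = ws) :
    pvLoopA ws i words verb obj =
      match pvFindSplit ws with
      | none => (verb, obj)
      | some (v, r) => (v, if r ≠ [] then some (pvObjOf r) else none) := by
  induction ws generalizing i with
  | nil => simp [pvLoopA, pvFindSplit]
  | cons w rest ih =>
    have hi : i < words.length := by
      by_contra h
      have : words.drop i = [] := List.drop_eq_nil_of_le (by omega)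
      rw [this] at hdrop; simp at hdrop
    have hdrop' : words.drop (i + 1) = rest := by
      have h2 : words.drop (i + 1) = (words.drop i).drop 1 := by rw [List.drop_drop]
      rw [h2, hdrop]; rfl
    by_cases hv : pvIsVerb (pvNorm w)
    · have hc : pvAllVerbs.contains (pvNorm w) = true := by rw [pvAllVerbs_contains]; exact hv
      have hiff : (i + 1 < words.length) ↔ rest ≠ [] := by
        have hlen : rest.length = words.length - (i + 1) := by
          rw [← hdrop']; simp
        constructor
        · intro h hr
          rw [hr] at hlen; simp at hlen; omega
        · intro hr
          rcases Nat.lt_or_ge (i + 1) words.length with h | h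
          · exact h
          · exact absurd (List.eq_nil_of_length_eq_zero (by omega)) hr
      simp only [pvLoopA, pvFindSplit, hv, hc, ite_true, hdrop']
      refine congrArg₂ Prod.mk rfl ?_
      by_cases hr : rest = []
      · simp [hr, hiff]
      · simp [hr, hiff.mpr hr]
    · have hc : pvAllVerbs.contains (pvNorm w) = false := by rw [pvAllVerbs_contains]; simp [hv]
      simp only [pvLoopA, pvFindSplit, hv, hc, Bool.false_eq_true, ite_false]
      exact ih (i + 1) hdrop'

theorem pv_main (clause : String) :
    extract_verb_and_object_py clause = extract_verb_and_object_py_alt clause := by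
  unfold extract_verb_and_object_py extract_verb_and_object_py_alt
  cases hw : PySem.Chars.split₀ (PySem.Chars.strip clause.toList) with
  | nil => rfl
  | cons w0 rest =>
    have hcoerce_rest :
        (match (if (w0 :: rest).length > 1 then some (pvObjOf rest) else none : Option (List Char)) with
          | some o => if o ≠ [] then some (String.ofList o) else none
          | none => none)
        = (if pvObjOf rest ≠ [] then some (String.ofList (pvObjOf rest)) else none) := by
      refine pv_coerce (pvObjOf rest) _ (fun h => ?_)
      have hr : rest = [] := by
        apply List.eq_nil_of_length_eq_zero
        simp only [List.length_cons, gt_iff_lt] at h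
        omega
      rw [hr]; rfl
    by_cases h0 : pvIsVerb (pvNorm w0)
    · -- head is a verb: A skips the loop, B's splitter succeeds at the head
      have hc : pvAllVerbs.contains (pvNorm w0) = true := by rw [pvAllVerbs_contains]; exact h0
      simp only [h0, not_true_eq_false, ite_false, pvFindSplit, hc, ite_true, Option.getD_some]
      exact congrArg₂ Prod.mk rfl hcoerce_rest
    · -- head not a verb: A runs the loop, B's splitter recurses past the head
      have hc : pvAllVerbs.contains (pvNorm w0) = false := by rw [pvAllVerbs_contains]; simp [h0]
      have hloop := pvLoopA_eq_findSplit rest 1 (w0 :: rest) (pvNorm w0)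
        (if (w0 :: rest).length > 1 then some (pvObjOf rest) else none) rfl
      simp only [h0, not_false_eq_true, ite_true, pvFindSplit, hc, Bool.false_eq_true, ite_false,
        hloop]
      cases hf : pvFindSplit rest with
      | none =>
        simp only [Option.getD_none]
        exact congrArg₂ Prod.mk rfl hcoerce_rest
      | some vr =>
        obtain ⟨v, r⟩ := vr
        simp only [Option.getD_some]
        refine congrArg₂ Prod.mk rfl ?_
        exact pv_coerce (pvObjOf r) _ (fun h => by
          have hr : r = [] := by simpa using h
          rw [hr, pvObjOf_nil])

-- ===== VERDICT (by name: the statement is the Claim_ definition above) =====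
theorem extract_verb_and_object_py_spec : Claim_equal_extract_verb_and_object_py := by
  unfold Claim_equal_extract_verb_and_object_py Spec_extract_verb_and_object_py
  exact fun clause _ => pv_main clause
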